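-- pv_equiv track=rewrite | github.com/tsunami935/nlp-sarcasm-detection | src/data_normalize.py | tokenize_single_quote
-- ===== SOURCE A (Python) =====
-- def tokenize_single_quote(tokens: list[str]) -> list[str]:
--     size = len(tokens)
--     start = None
--     end = None
--     i = 0
--     while i < size:
--         if tokens[i].startswith("'"):
--             start = i
--         if tokens[i].endswith("'") and start is not None:
--             end = i
--             prev = tokens[:start]
--             curr = (
--                 ["'", tokens[start][1:]]
--                 + tokens[start + 1 : end]
--                 + [tokens[end][:-1], "'"]
--                 if start != end
--                 else ["'", tokens[i][1:-1], "'"]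
--             )
--             next = tokenize_single_quote(tokens[i + 1 :]) if i + 1 < size else []
--             return prev + curr + next
--         if tokens[i].endswith(("':", "',")) and start is not None:
--             end = i
--             prev = tokens[:start]
--             curr = (
--                 ["'", tokens[start][1:]]
--                 + tokens[start + 1 : end]
--                 + [tokens[end][:-2], "'", tokens[end][-1]]
--                 if start != end
--                 else ["'", tokens[i][1:-2], "'", tokens[end][-1]]
--             )
--             next = tokenize_single_quote(tokens[i + 1 :]) if i + 1 < size else []
--             return prev + curr + next
--         i += 1
--     return tokens
-- ===== SOURCE B (Python) =====
-- def tokenize_single_quote(tokens: list[str]) -> list[str]: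
--     out = []
--     buf = []
--     start = None  # index into buf of latest token starting with "'"
--     for t in tokens:
--         s = len(buf) if t.startswith("'") else start
--         if t.endswith("'") and s is not None:
--             if s == len(buf):
--                 curr = ["'", t[1:-1], "'"]
--             else:
--                 curr = ["'", buf[s][1:]] + buf[s + 1:] + [t[:-1], "'"]
--             out += buf[:s] + curr
--             buf = []
--             start = None
--         elif t.endswith(("':", "',")) and s is not None:
--             if s == len(buf):
--                 curr = ["'", t[1:-2], "'", t[-1]]
--             else:
--                 curr = ["'", buf[s][1:]] + buf[s + 1:] + [t[:-2], "'", t[-1]]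
--             out += buf[:s] + curr
--             buf = []
--             start = None
--         else:
--             buf.append(t)
--             start = s
--     return out + buf
-- ===== Notes on version B (the rewrite author's own statement) =====
-- stated objective: alternative
-- what changed: Replaced A's restart-on-match recursion (which re-slices the token list and recursively re-tokenizes the remaining suffix after every matched quote pair) by a single left-to-right pass with an output accumulator and a pending buffer that is reset after each matched quote pair; avoids A's quadratic worst case, though a timing run read only ~1.3x on the generated inputs.
import Mathlib
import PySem

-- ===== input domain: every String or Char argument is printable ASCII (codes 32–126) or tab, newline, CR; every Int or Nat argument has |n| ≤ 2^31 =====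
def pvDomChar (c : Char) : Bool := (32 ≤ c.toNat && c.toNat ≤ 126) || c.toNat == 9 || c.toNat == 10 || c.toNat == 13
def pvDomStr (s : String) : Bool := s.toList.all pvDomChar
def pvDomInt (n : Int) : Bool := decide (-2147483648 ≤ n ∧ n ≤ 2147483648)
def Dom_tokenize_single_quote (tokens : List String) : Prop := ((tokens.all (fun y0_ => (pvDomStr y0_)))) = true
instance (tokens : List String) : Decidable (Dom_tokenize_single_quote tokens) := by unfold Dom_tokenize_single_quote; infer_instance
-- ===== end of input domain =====

-- B replaces A's recursive re-scan (slices + recursion after every matched quote pair) by a single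
-- left-to-right pass with an output accumulator and a pending buffer; objective: alternative.


-- ===== PORT A =====
-- A's while-loop together with its tail recursion (the recursive call re-enters the loop with
-- start = None, i = 0), step for step; tokens[i] is in range since the loop guards i < size.
def tszGo (tokens : List String) (start : Option Nat) (i : Nat) : List String :=
  if _h : i < tokens.length then
    let t := tokens.getD i ""
    let start1 := if PySem.Str.startswith t "'" then some i else start
    match start1 with
    | some s =>
      if PySem.Str.endswith t "'" then
        let prev := PySem.List.slice tokens none (some (s : Int))
        let curr :=
          if s ≠ i then
            ["'", PySem.Str.slice (tokens.getD s "") (some 1) none]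
              ++ PySem.List.slice tokens (some ((s : Int) + 1)) (some (i : Int))
              ++ [PySem.Str.slice t none (some (-1)), "'"]
          else ["'", PySem.Str.slice t (some 1) (some (-1)), "'"]
        let nxt := if i + 1 < tokens.length then
            tszGo (PySem.List.slice tokens (some ((i : Int) + 1)) none) none 0 else []
        prev ++ curr ++ nxt
      else if PySem.Str.endswith t "':" || PySem.Str.endswith t "'," then
        let last := ((PySem.Str.pyGet? t (-1)).map (fun c => String.ofList [c])).getD ""
        let prev := PySem.List.slice tokens none (some (s : Int))
        let curr :=
          if s ≠ i then
            ["'", PySem.Str.slice (tokens.getD s "") (some 1) none]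
              ++ PySem.List.slice tokens (some ((s : Int) + 1)) (some (i : Int))
              ++ [PySem.Str.slice t none (some (-2)), "'", last]
          else ["'", PySem.Str.slice t (some 1) (some (-2)), "'", last]
        let nxt := if i + 1 < tokens.length then
            tszGo (PySem.List.slice tokens (some ((i : Int) + 1)) none) none 0 else []
        prev ++ curr ++ nxt
      else tszGo tokens start1 (i + 1)
    | none => tszGo tokens start1 (i + 1)
  else tokens
termination_by (tokens.length, tokens.length - i)
decreasing_by
  all_goals first
    | (left
       rw [show ((i : Int) + 1) = ((i + 1 : Nat) : Int) by push_cast; ring,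
          PySem.List.slice_from_natCast]
       simp only [List.length_drop]; omega)
    | (right; omega)

def tokenize_single_quote (tokens : List String) : List String := tszGo tokens none 0

-- ===== PORT B =====
-- B's single pass: out = emitted output, buf = tokens since the last match, start = index in buf
-- of the latest token starting with a quote.
def altLoop (out buf : List String) (start : Option Nat) (rest : List String) : List String :=
  match rest with
  | [] => out ++ buf
  | t :: ts =>
    let s := if PySem.Str.startswith t "'" then some buf.length else start
    match s with
    | some k =>
      if PySem.Str.endswith t "'" then
        let curr :=
          if k = buf.length then ["'", PySem.Str.slice t (some 1) (some (-1)), "'"]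
          else
            ["'", PySem.Str.slice (buf.getD k "") (some 1) none]
              ++ PySem.List.slice buf (some ((k : Int) + 1)) none
              ++ [PySem.Str.slice t none (some (-1)), "'"]
        altLoop (out ++ PySem.List.slice buf none (some (k : Int)) ++ curr) [] none ts
      else if PySem.Str.endswith t "':" || PySem.Str.endswith t "'," then
        let last := ((PySem.Str.pyGet? t (-1)).map (fun c => String.ofList [c])).getD ""
        let curr :=
          if k = buf.length then ["'", PySem.Str.slice t (some 1) (some (-2)), "'", last]
          else
            ["'", PySem.Str.slice (buf.getD k "") (some 1) none]
              ++ PySem.List.slice buf (some ((k : Int) + 1)) none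
              ++ [PySem.Str.slice t none (some (-2)), "'", last]
        altLoop (out ++ PySem.List.slice buf none (some (k : Int)) ++ curr) [] none ts
      else altLoop out (buf ++ [t]) s ts
    | none => altLoop out (buf ++ [t]) s ts

def tokenize_single_quote_alt (tokens : List String) : List String := altLoop [] [] none tokens

-- ===== PRECONDITION & SPEC =====
def Spec_tokenize_single_quote (tokens : List String) (out : List String) : Prop := out = tokenize_single_quote_alt tokens
instance (tokens : List String) (out : List String) : Decidable (Spec_tokenize_single_quote tokens out) := by unfold Spec_tokenize_single_quote; infer_instance

-- ===== CLAIM (what is proved, stated in full; the proofs are below) =====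
def Claim_equal_tokenize_single_quote : Prop := ∀ (tokens : List String), Dom_tokenize_single_quote tokens → Spec_tokenize_single_quote tokens (tokenize_single_quote tokens)

-- ===== LEMMAS AND PROOFS =====

theorem tszGo_nil (s : Option Nat) (i : Nat) : tszGo [] s i = [] := by
  rw [tszGo]; simp

theorem tszGo_next (buf : List String) (t : String) (ts : List String) :
    (if buf.length + 1 < (buf ++ t :: ts).length then
        tszGo (PySem.List.slice (buf ++ t :: ts) (some ((buf.length : Int) + 1)) none) none 0
      else []) = tszGo ts none 0 := by
  have hs : PySem.List.slice (buf ++ t :: ts) (some ((buf.length : Int) + 1)) none = ts := by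
    rw [show ((buf.length : Int) + 1) = ((buf.length + 1 : Nat) : Int) by push_cast; ring,
       PySem.List.slice_from_natCast]
    simp
  rw [hs]
  split_ifs with h
  · rfl
  · simp only [List.length_append, List.length_cons] at h
    have hts : ts = [] := by
      have := List.length_eq_zero_iff.mp (by omega : ts.length = 0)
      exact this
    rw [hts, tszGo_nil]

theorem slice_mid (buf : List String) (t : String) (ts : List String) (k : Nat)
    (hk : k < buf.length) :
    PySem.List.slice (buf ++ t :: ts) (some ((k : Int) + 1)) (some (buf.length : Int)) =
      PySem.List.slice buf (some ((k : Int) + 1)) none := by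
  rw [show ((k : Int) + 1) = ((k + 1 : Nat) : Int) by push_cast; ring,
     PySem.List.slice_natCast, PySem.List.slice_from_natCast,
     List.drop_append_of_le_length (by omega), List.take_left' (by simp)]

theorem altLoop_eq_tszGo (rest : List String) : ∀ (out buf : List String) (start : Option Nat),
    (∀ k, start = some k → k < buf.length) →
    altLoop out buf start rest = out ++ tszGo (buf ++ rest) start buf.length := by
  induction rest with
  | nil =>
    intro out buf start hinv
    rw [tszGo]
    simp [altLoop]
  | cons t ts ih =>
    intro out buf start hinv
    rw [tszGo]
    have hlen : buf.length < (buf ++ t :: ts).length := by simp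
    rw [dif_pos hlen]
    have ht : (buf ++ t :: ts).getD buf.length "" = t := by
      simp [List.getD]
    simp only [ht, altLoop]
    by_cases hsw : PySem.Str.startswith t "'" = true
    · -- start1 = some buf.length, so the start = end case fires on a match
      simp only [hsw, if_true]
      by_cases he1 : PySem.Str.endswith t "'" = true
      · simp only [he1, if_true, ne_eq, not_true_eq_false, if_false, if_true]
        rw [ih _ [] none (by simp), tszGo_next]
        have h1 : PySem.List.slice (buf ++ t :: ts) none (some (buf.length : Int)) = buf := by
          rw [PySem.List.slice_to_natCast]; simp
        have h2 : PySem.List.slice buf none (some (buf.length : Int)) = buf := by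
          rw [PySem.List.slice_to_natCast]; simp
        rw [h1, h2]
        simp
      · by_cases he2 : (PySem.Str.endswith t "':" || PySem.Str.endswith t "',") = true
        · simp only [he1, he2, if_true, if_false, ne_eq, not_true_eq_false,
            Bool.false_eq_true]
          rw [ih _ [] none (by simp), tszGo_next]
          have h1 : PySem.List.slice (buf ++ t :: ts) none (some (buf.length : Int)) = buf := by
            rw [PySem.List.slice_to_natCast]; simp
          have h2 : PySem.List.slice buf none (some (buf.length : Int)) = buf := by
            rw [PySem.List.slice_to_natCast]; simp
          rw [h1, h2]
          simp
        · simp only [he1, he2, if_false, Bool.false_eq_true]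
          rw [ih _ (buf ++ [t]) (some buf.length) (by intro k hk; injection hk with h; subst h; simp only [List.length_append, List.length_cons, List.length_nil]; omega)]
          simp [List.append_assoc]
    · -- start1 = start
      simp only [hsw, if_false, Bool.false_eq_true]
      cases hstart : start with
      | none =>
        rw [ih _ (buf ++ [t]) none (by simp)]
        simp [List.append_assoc]
      | some k =>
        have hk : k < buf.length := hinv k hstart
        have hgd : (buf ++ t :: ts).getD k "" = buf.getD k "" := by
          simp [List.getD, List.getElem?_append_left hk]
        have hne : k ≠ buf.length := by omega
        by_cases he1 : PySem.Str.endswith t "'" = true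
        · simp only [he1, if_true, hne, ne_eq, if_false, if_true, not_false_eq_true]
          rw [ih _ [] none (by simp), tszGo_next]
          have h1 : PySem.List.slice (buf ++ t :: ts) none (some (k : Int)) =
              PySem.List.slice buf none (some (k : Int)) := by
            rw [PySem.List.slice_to_natCast, PySem.List.slice_to_natCast,
               List.take_append_of_le_length (by omega)]
          rw [h1, hgd, slice_mid buf t ts k hk]
          simp
        · by_cases he2 : (PySem.Str.endswith t "':" || PySem.Str.endswith t "',") = true
          · simp only [he1, he2, if_true, if_false, hne, ne_eq, not_false_eq_true,
              Bool.false_eq_true]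
            rw [ih _ [] none (by simp), tszGo_next]
            have h1 : PySem.List.slice (buf ++ t :: ts) none (some (k : Int)) =
                PySem.List.slice buf none (some (k : Int)) := by
              rw [PySem.List.slice_to_natCast, PySem.List.slice_to_natCast,
                 List.take_append_of_le_length (by omega)]
            rw [h1, hgd, slice_mid buf t ts k hk]
            simp
          · simp only [he1, he2, if_false, Bool.false_eq_true]
            rw [ih _ (buf ++ [t]) (some k) (by intro k' hk'; injection hk' with h; subst h; simp only [List.length_append, List.length_cons, List.length_nil]; omega)]
            simp [List.append_assoc]

-- ===== VERDICT (by name: the statement is the Claim_ definition above) =====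
theorem tokenize_single_quote_spec : Claim_equal_tokenize_single_quote := by
  intro tokens _
  unfold Spec_tokenize_single_quote tokenize_single_quote tokenize_single_quote_alt
  rw [altLoop_eq_tszGo tokens [] [] none (by simp)]
  simp
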